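-- pv_equiv track=rewrite | github.com/rohitjenveja/sample_django_trie | vsnlookup/validation.py | FewestWildcards
-- ===== SOURCE A (Python) =====
-- def FewestWildcards(matched_values):
--   """Returns a list of the items that have the fewest wildcards.
--
--   Args:
--     match_values: All valid VSNs.
--
--   Returns:
--     A list of VSNs with the fewest wildcards. It can return multiple VSNs,
--     if they have an equal number of wildcards.
--   """
--   min_key_value = []
--   for value in matched_values:
--     count = value.count('*')
--     if not min_key_value:
--       min_key_value = [[value], count]
--     elif count < min_key_value[1]:  # compare count of previous min_key_value
--       min_key_value = ([value], count)
--     # Handle the case where same number of wildcards in two expressions.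
--     elif count == min_key_value[1]:
--       min_key_value[0].append(value)
--   return min_key_value[0]
-- ===== SOURCE B (Python) =====
-- def FewestWildcards(matched_values):
--   """Returns a list of the items that have the fewest wildcards.
--
--   Sort-then-filter: a stable sort by wildcard count puts the minimum-count
--   values first in their original relative order; filter keeps exactly them.
--   """
--   s = sorted(matched_values, key=lambda v: v.count('*'))
--   minc = s[0].count('*')
--   return [v for v in s if v.count('*') == minc]
-- ===== Notes on version B (the rewrite author's own statement) =====
-- stated objective: simpler
-- what changed: Replaces the single-pass running-minimum with tie-list accumulation by a stable sort on wildcard count followed by a filter of the minimum-count block (stability preserves the original tie order).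
import Mathlib
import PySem

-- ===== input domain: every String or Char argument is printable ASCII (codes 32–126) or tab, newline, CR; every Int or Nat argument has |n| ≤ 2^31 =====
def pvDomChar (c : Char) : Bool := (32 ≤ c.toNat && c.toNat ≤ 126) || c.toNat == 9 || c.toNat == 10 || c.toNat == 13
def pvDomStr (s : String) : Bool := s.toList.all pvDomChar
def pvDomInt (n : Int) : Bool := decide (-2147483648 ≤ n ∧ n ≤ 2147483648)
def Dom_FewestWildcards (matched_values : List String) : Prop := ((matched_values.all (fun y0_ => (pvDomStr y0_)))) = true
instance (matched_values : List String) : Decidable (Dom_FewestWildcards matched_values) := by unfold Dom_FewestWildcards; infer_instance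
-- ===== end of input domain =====

-- B replaces A's running-minimum-with-tie-accumulation loop by a stable sort on
-- wildcard count followed by a filter of the minimum-count block (simpler).

-- ===== PORT A =====
-- A's loop body: the state is Python's `min_key_value`, [] before the first
-- element and then ([values], count); ported as Option (List String × Nat).
def FewestWildcardsStep (mkv : Option (List String × Nat)) (value : String) :
    Option (List String × Nat) :=
  let count := PySem.Str.count value "*"
  match mkv with
  | none => some ([value], count)
  | some (vs, c) =>
    if count < c then some ([value], count)
    else if count = c then some (vs ++ [value], c)
    else some (vs, c)

def FewestWildcards (matched_values : List String) : List String :=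
  match matched_values.foldl FewestWildcardsStep none with
  | some (vs, _) => vs
  | none => []    -- Python raises IndexError here; excluded by Pre_

-- ===== PORT B =====
def FewestWildcards_alt (matched_values : List String) : List String :=
  let s := PySem.List.sorted matched_values (fun v => PySem.Str.count v "*") false
  match PySem.List.pyGet? s 0 with
  | none => []    -- Python raises IndexError here; excluded by Pre_
  | some h =>
    let minc := PySem.Str.count h "*"
    s.filter (fun v => PySem.Str.count v "*" == minc)

-- ===== PRECONDITION & SPEC =====
-- Pre_ excludes only the empty list, on which the Python A raises IndexError.
def Pre_FewestWildcards (matched_values : List String) : Prop := matched_values ≠ []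
instance (matched_values : List String) : Decidable (Pre_FewestWildcards matched_values) := by
  unfold Pre_FewestWildcards; infer_instance

def pvWitness_FewestWildcards : List String := ["a*b", "cd", "e*"]

def Spec_FewestWildcards (matched_values : List String) (out : List String) : Prop := out = FewestWildcards_alt matched_values
instance (matched_values : List String) (out : List String) : Decidable (Spec_FewestWildcards matched_values out) := by unfold Spec_FewestWildcards; infer_instance

-- ===== CLAIM (what is proved, stated in full; the proofs are below) =====
def Claim_equal_FewestWildcards : Prop := ∀ (matched_values : List String), Dom_FewestWildcards matched_values → Pre_FewestWildcards matched_values → Spec_FewestWildcards matched_values (FewestWildcards matched_values)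

-- ===== LEMMAS AND PROOFS =====

-- proof-side abbreviation for the wildcard count
def pvCnt (v : String) : Nat := PySem.Str.count v "*"

-- A's loop from a populated state: first component is the filter at the
-- running minimum, second component is the running minimum.
lemma A_loop (t : List String) : ∀ (vs : List String) (c : Nat),
    t.foldl FewestWildcardsStep (some (vs, c)) =
      some (if (t.map pvCnt).foldl min c < c
              then t.filter (fun v => pvCnt v == (t.map pvCnt).foldl min c)
              else vs ++ t.filter (fun v => pvCnt v == c),
            (t.map pvCnt).foldl min c) := by
  induction t with
  | nil => intro vs c; simp
  | cons v r ih =>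
    intro vs c
    have hmle := (PySem.List.foldl_min_le (r.map pvCnt) (min c (pvCnt v))).1
    simp only [List.foldl_cons, List.map_cons, FewestWildcardsStep,
      show PySem.Str.count v "*" = pvCnt v from rfl]
    rcases Nat.lt_trichotomy (pvCnt v) c with hlt | heq | hgt
    · rw [if_pos hlt, ih [v] (pvCnt v)]
      have hm : min c (pvCnt v) = pvCnt v := by omega
      rw [hm]
      set M := (r.map pvCnt).foldl min (pvCnt v) with hM
      have hMle : M ≤ pvCnt v := by simpa [hm] using hmle
      rw [if_pos (show M < c by omega)]
      congr 1
      rcases Nat.lt_or_ge M (pvCnt v) with h1 | h1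
      · rw [if_pos h1]
        simp [show (pvCnt v == M) = false by simp; omega]
      · have hMv : M = pvCnt v := by omega
        rw [if_neg (by omega)]
        simp [hMv]
    · rw [if_neg (by omega), if_pos heq, ih (vs ++ [v]) c, heq, min_self]
      set M := (r.map pvCnt).foldl min c with hM
      have hMle : M ≤ c := by simpa [min_self, heq] using hmle
      congr 1
      rcases Nat.lt_or_ge M c with h1 | h1
      · rw [if_pos h1, if_pos h1]
        simp [heq, show (c == M) = false by simp; omega]
      · rw [if_neg (by omega), if_neg (by omega)]
        simp [heq]
    · rw [if_neg (by omega), if_neg (by omega), ih vs c]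
      have hm : min c (pvCnt v) = c := by omega
      rw [hm]
      set M := (r.map pvCnt).foldl min c with hM
      have hMle : M ≤ c := by simpa [hm] using hmle
      congr 1
      rcases Nat.lt_or_ge M c with h1 | h1
      · rw [if_pos h1, if_pos h1]
        simp [show (pvCnt v == M) = false by simp; omega]
      · rw [if_neg (by omega), if_neg (by omega)]
        simp [show (pvCnt v == c) = false by simp; omega]

-- stability at the minimum through one ordered insertion
lemma filter_insertBy_min (m : Nat) :
    ∀ (ys : List String), ys.Pairwise (fun a b => pvCnt a ≤ pvCnt b) →
    (∀ y ∈ ys, m ≤ pvCnt y) → ∀ (x : String), m ≤ pvCnt x →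
    (PySem.List.insertBy (fun a b => decide (pvCnt a < pvCnt b)) x ys).filter
        (fun v => pvCnt v == m) =
      if pvCnt x = m then ys.filter (fun v => pvCnt v == m) ++ [x]
      else ys.filter (fun v => pvCnt v == m) := by
  intro ys
  induction ys with
  | nil =>
    intro _ _ x hx
    by_cases h : pvCnt x = m <;> simp [PySem.List.insertBy, h]
  | cons y t ih =>
    intro hp hm x hx
    simp only [PySem.List.insertBy]
    by_cases hb : pvCnt x < pvCnt y
    · rw [if_pos (by simpa using hb)]
      by_cases hxm : pvCnt x = m
      · have hempty : (y :: t).filter (fun v => pvCnt v == m) = [] := by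
          rw [List.filter_eq_nil_iff]
          intro a ha
          have h1 : pvCnt y ≤ pvCnt a := by
            rcases List.mem_cons.mp ha with rfl | ha
            · exact le_refl _
            · exact (List.pairwise_cons.mp hp).1 a ha
          simp only [beq_iff_eq]
          omega
        simp [hxm, hempty]
      · simp [List.filter_cons, hxm]
    · rw [if_neg (by simpa using hb)]
      have hrec := ih (List.pairwise_cons.mp hp).2 (fun y hy => hm y (by simp [hy])) x hx
      by_cases hxm : pvCnt x = m <;> by_cases hym : pvCnt y = m <;>
        simp [hxm, hym] at hrec ⊢ <;> simp [hrec]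

-- a stable sort keeps the minimum-count elements in their original order
lemma filter_sorted_min (m : Nat) (xs : List String)
    (hm : ∀ y ∈ xs, m ≤ pvCnt y) :
    (PySem.List.sorted xs pvCnt).filter (fun v => pvCnt v == m) =
      xs.filter (fun v => pvCnt v == m) := by
  induction xs using List.reverseRecOn with
  | nil => simp [PySem.List.sorted_eq_foldl_insertBy]
  | append_singleton xs x ih =>
    have hstep : PySem.List.sorted (xs ++ [x]) pvCnt =
        PySem.List.insertBy (fun a b => decide (pvCnt a < pvCnt b)) x
          (PySem.List.sorted xs pvCnt) := by
      rw [PySem.List.sorted_eq_foldl_insertBy, PySem.List.sorted_eq_foldl_insertBy,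
        List.foldl_append]
      rfl
    have hm' : ∀ y ∈ xs, m ≤ pvCnt y := fun y hy => hm y (by simp [hy])
    have hms : ∀ y ∈ PySem.List.sorted xs pvCnt, m ≤ pvCnt y := fun y hy =>
      hm' y ((PySem.List.mem_sorted xs pvCnt false y).mp hy)
    have hx : m ≤ pvCnt x := hm x (by simp)
    rw [hstep,
      filter_insertBy_min m _ (PySem.List.sorted_pairwise xs pvCnt) hms x hx,
      List.filter_append]
    by_cases hxm : pvCnt x = m <;> simp [hxm, ih hm']

-- ===== VERDICT (by name: the statement is the Claim_ definition above) =====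
theorem FewestWildcards_spec : Claim_equal_FewestWildcards := by
  intro mv _ hpre
  unfold Spec_FewestWildcards
  match mv, hpre with
  | v :: t, _ =>
    -- the overall minimum wildcard count
    set M := (t.map pvCnt).foldl min (pvCnt v) with hMdef
    have hMle : ∀ y ∈ v :: t, M ≤ pvCnt y := by
      intro y hy
      have h := PySem.List.foldl_min_le (t.map pvCnt) (pvCnt v)
      rcases List.mem_cons.mp hy with rfl | hy
      · exact h.1
      · exact h.2 (pvCnt y) (List.mem_map_of_mem hy)
    have hMmem : ∃ y ∈ v :: t, pvCnt y = M := by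
      rcases PySem.List.foldl_min_mem (t.map pvCnt) (pvCnt v) with h | h
      · exact ⟨v, by simp, h.symm⟩

      · rcases List.mem_map.mp h with ⟨y, hy, hyv⟩
        exact ⟨y, by simp [hy], hyv⟩
    -- A computes the filter at M
    have hA : FewestWildcards (v :: t) =
        (v :: t).filter (fun w => pvCnt w == M) := by
      unfold FewestWildcards
      rw [List.foldl_cons,
        show FewestWildcardsStep none v = some ([v], pvCnt v) from rfl,
        A_loop t [v] (pvCnt v), ← hMdef]
      have hMv : M ≤ pvCnt v := hMle v (by simp)
      rcases Nat.lt_or_ge M (pvCnt v) with h1 | h1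
      · rw [if_pos h1]
        simp [show (pvCnt v == M) = false by simp; omega]
      · have : M = pvCnt v := by omega
        rw [if_neg (by omega)]
        simp [this]
    -- B computes the same filter, over the sorted list
    have hsne : PySem.List.sorted (v :: t) pvCnt ≠ [] := by
      simp [PySem.List.sorted_eq_nil_iff]
    obtain ⟨h, s', hs⟩ := List.exists_cons_of_ne_nil hsne
    have hh : pvCnt h = M := by
      have h1 : pvCnt h ≤ M := by
        rcases hMmem with ⟨y, hy, hyM⟩
        calc pvCnt h ≤ pvCnt y := PySem.List.key_head_sorted_le (v :: t) pvCnt hs y hy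
          _ = M := hyM
      have h2 : M ≤ pvCnt h := hMle h (by
        have : h ∈ PySem.List.sorted (v :: t) pvCnt := by simp [hs]
        exact (PySem.List.mem_sorted (v :: t) pvCnt false h).mp this)
      omega
    have hB : FewestWildcards_alt (v :: t) =
        (v :: t).filter (fun w => pvCnt w == M) := by
      unfold FewestWildcards_alt
      simp only [show (fun v => PySem.Str.count v "*") = pvCnt from rfl, hs]
      rw [show PySem.List.pyGet? (h :: s') (0 : Int) = some h by simp [PySem.List.pyGet?, PySem.List.pyIdx?]]
      simp only [show PySem.Str.count h "*" = pvCnt h from rfl, hh, ← hs]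
      exact filter_sorted_min M (v :: t) hMle
    rw [hA, hB]
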